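-- pv_equiv track=rewrite | github.com/StarLooo/MocrecS | Utils.py | get_bit_map
-- ===== SOURCE A (Python) =====
-- def get_bit_map(new_student, courses):
--     k_positive = 0
--     bit_map = ''
--     for course_id in courses:
--         if course_id in new_student:
--             bit_map += '1'
--             k_positive += 1
--         else:
--             bit_map += '0'
--     return bit_map, k_positive
-- ===== SOURCE B (Python) =====
-- def get_bit_map(new_student, courses):
--     positions = {}
--     for i, course_id in enumerate(courses):
--         positions.setdefault(course_id, []).append(i)
--     bits = ['0'] * len(courses)
--     for s in new_student:
--         for i in positions.get(s, []):
--             bits[i] = '1'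
--     return ''.join(bits), bits.count('1')
-- ===== Notes on version B (the rewrite author's own statement) =====
-- stated objective: alternative
-- what changed: Inverts A's loop structure: instead of testing 'course_id in new_student' inside one fused loop over courses, B builds a course_id -> positions index of courses once, then marks a pre-filled '0' bit array by iterating over new_student, joining and counting at the end.
import Mathlib
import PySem

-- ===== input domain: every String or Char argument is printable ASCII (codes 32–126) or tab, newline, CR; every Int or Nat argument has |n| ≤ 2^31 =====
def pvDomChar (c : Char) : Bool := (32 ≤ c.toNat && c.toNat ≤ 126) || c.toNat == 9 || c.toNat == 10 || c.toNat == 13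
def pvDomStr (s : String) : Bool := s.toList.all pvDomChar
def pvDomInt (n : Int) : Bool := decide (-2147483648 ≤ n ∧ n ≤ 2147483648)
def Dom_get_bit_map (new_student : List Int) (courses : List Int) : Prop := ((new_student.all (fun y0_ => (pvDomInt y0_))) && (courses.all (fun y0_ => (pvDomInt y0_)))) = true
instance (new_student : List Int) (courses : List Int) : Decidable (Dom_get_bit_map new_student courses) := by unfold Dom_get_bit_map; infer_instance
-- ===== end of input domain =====

-- B inverts A's loops: it indexes courses once by a course_id → positions dict, then marks a '0' bit
-- array by iterating over new_student; objective: a different (inverted, index-based) algorithm.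

-- ===== PORT A =====
-- A: one loop over courses, membership test 'course_id in new_student' each step,
-- accumulating (bit_map, k_positive) together.
def get_bit_map (new_student : List Int) (courses : List Int) : String × Int :=
  courses.foldl
    (fun (st : String × Int) course_id =>
      if new_student.contains course_id then (st.1 ++ "1", st.2 + 1)
      else (st.1 ++ "0", st.2))
    ("", 0)

-- ===== PORT B =====
-- B: build positions : dict course_id → list of indices (one pass over enumerate(courses)),
-- then for each student id mark those positions in a '0'-filled bit list, then join and count.
def get_bit_map_alt (new_student : List Int) (courses : List Int) : String × Int :=
  let positions : PySem.Dict Int (List Int) :=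
    (PySem.List.enumerate courses).foldl
      (fun d p => d.modify p.2 [] (fun l => l ++ [p.1])) PySem.Dict.empty
  let bits : List Char :=
    new_student.foldl
      (fun bs s => (positions.getD s []).foldl (fun bs i => PySem.List.pySetD bs i '1') bs)
      (List.replicate courses.length '0')
  (String.ofList bits, (PySem.List.count bits '1' : Int))

-- ===== PRECONDITION & SPEC =====
def Spec_get_bit_map (new_student : List Int) (courses : List Int) (out : String × Int) : Prop := out = get_bit_map_alt new_student courses
instance (new_student : List Int) (courses : List Int) (out : String × Int) : Decidable (Spec_get_bit_map new_student courses out) := by unfold Spec_get_bit_map; infer_instance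

-- ===== CLAIM (what is proved, stated in full; the proofs are below) =====
def Claim_equal_get_bit_map : Prop := ∀ (new_student : List Int) (courses : List Int), Dom_get_bit_map new_student courses → Spec_get_bit_map new_student courses (get_bit_map new_student courses)

-- ===== LEMMAS AND PROOFS =====

-- B's positions dict (same fold as in the port, by rfl).
def pvPosOf (courses : List Int) : PySem.Dict Int (List Int) :=
  (PySem.List.enumerate courses).foldl
    (fun d p => d.modify p.2 [] (fun l => l ++ [p.1])) PySem.Dict.empty

-- B's inner marking loop and outer student loop, named for the lemmas (rfl-equal to the port's folds).
def pvMarkOne (bs : List Char) (P : List Int) : List Char :=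
  P.foldl (fun bs i => PySem.List.pySetD bs i '1') bs

def pvMarkAll (courses ss : List Int) (bs : List Char) : List Char :=
  ss.foldl (fun bs s => pvMarkOne bs ((pvPosOf courses).getD s [])) bs

theorem pvPosOf_getD (courses : List Int) (c : Int) :
    (pvPosOf courses).getD c []
      = ((PySem.List.enumerate courses).filter (fun p => p.2 == c)).map (·.1) := by
  unfold pvPosOf
  -- rewrite the fold as a fold over the swapped pairs, then use the grouping lemma
  have hswap :
      (PySem.List.enumerate courses).foldl
          (fun (d : PySem.Dict Int (List Int)) p => d.modify p.2 [] (fun l => l ++ [p.1]))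
          PySem.Dict.empty
        = ((PySem.List.enumerate courses).map (fun p => (p.2, p.1))).foldl
          (fun (d : PySem.Dict Int (List Int)) p => d.modify p.1 [] (fun l => l ++ [p.2]))
          PySem.Dict.empty := by
    rw [List.foldl_map]
  rw [hswap, PySem.Dict.getD_foldl_modify_append, List.filter_map, List.map_map]
  rfl

theorem pvPosOf_mem (courses : List Int) (c : Int) (j : Nat) :
    ((j : Int) ∈ (pvPosOf courses).getD c []) ↔ ∃ h : j < courses.length, courses[j] = c := by
  rw [pvPosOf_getD]
  simp only [List.mem_map, List.mem_filter, PySem.List.mem_enumerate_iff]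
  constructor
  · rintro ⟨p, ⟨⟨k, hk, rfl⟩, hc⟩, hj⟩
    simp at hc hj
    exact ⟨by omega, by simpa [show j = k by omega] using hc⟩
  · rintro ⟨h, hc⟩
    exact ⟨((j : Int), courses[j]), ⟨⟨j, h, by simp⟩, by simpa using hc⟩, rfl⟩

theorem pvPosOf_nonneg (courses : List Int) (c : Int) :
    ∀ i ∈ (pvPosOf courses).getD c [], 0 ≤ i := by
  intro i hi
  rw [pvPosOf_getD] at hi
  simp only [List.mem_map, List.mem_filter, PySem.List.mem_enumerate_iff] at hi
  obtain ⟨p, ⟨⟨k, hk, rfl⟩, -⟩, hj⟩ := hi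
  simp at hj; omega

theorem pvMarkOne_length (bs : List Char) (P : List Int) :
    (pvMarkOne bs P).length = bs.length := by
  induction P generalizing bs with
  | nil => rfl
  | cons i P ih => simpa [pvMarkOne] using ih (PySem.List.pySetD bs i '1')

theorem pvMarkOne_getElem? (bs : List Char) (P : List Int) (hP : ∀ i ∈ P, 0 ≤ i)
    (j : Nat) (hj : j < bs.length) :
    (pvMarkOne bs P)[j]? = some (if (j : Int) ∈ P then '1' else bs[j]) := by
  induction P generalizing bs with
  | nil => simp [pvMarkOne, List.getElem?_eq_getElem hj]
  | cons i P ih =>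
    have hi : 0 ≤ i := hP i (by simp)
    have hset : PySem.List.pySetD bs i '1' = bs.set i.toNat '1' :=
      PySem.List.pySetD_of_nonneg bs '1' hi
    have hlen : j < (PySem.List.pySetD bs i '1').length := by
      simpa [hset] using hj
    have := ih (PySem.List.pySetD bs i '1') (fun x hx => hP x (by simp [hx])) hlen
    simp only [pvMarkOne, List.foldl_cons] at *
    rw [this]
    simp only [hset, List.getElem_set, List.mem_cons]
    by_cases hmem : (j : Int) ∈ P
    · simp [hmem]
    · by_cases hji : (j : Int) = i
      · have hj2 : i.toNat = j := by omega
        simp [hji, hj2]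
      · have hj2 : ¬ i.toNat = j := by omega
        simp [hmem, hji, hj2]

theorem pvMarkAll_length (courses ss : List Int) (bs : List Char) :
    (pvMarkAll courses ss bs).length = bs.length := by
  induction ss generalizing bs with
  | nil => rfl
  | cons s ss ih =>
    simpa [pvMarkAll, pvMarkOne_length] using ih (pvMarkOne bs ((pvPosOf courses).getD s []))

theorem pvMarkAll_getElem? (courses ss : List Int) (bs : List Char)
    (hlen : bs.length = courses.length) (j : Nat) (hj : j < courses.length) :
    (pvMarkAll courses ss bs)[j]?
      = some (if courses[j] ∈ ss then '1' else bs[j]'(by omega)) := by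
  induction ss generalizing bs with
  | nil =>
    simp [pvMarkAll, List.getElem?_eq_getElem (show j < bs.length by omega)]
  | cons s ss ih =>
    have hb : j < bs.length := by omega
    have hlen' : (pvMarkOne bs ((pvPosOf courses).getD s [])).length = courses.length := by
      rw [pvMarkOne_length]; exact hlen
    have := ih (pvMarkOne bs ((pvPosOf courses).getD s [])) hlen'
    simp only [pvMarkAll, List.foldl_cons] at *
    rw [this]
    have hone := pvMarkOne_getElem? bs ((pvPosOf courses).getD s [])
      (pvPosOf_nonneg courses s) j hb
    have hone' : (pvMarkOne bs ((pvPosOf courses).getD s []))[j]'(by omega)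
        = if (j : Int) ∈ (pvPosOf courses).getD s [] then '1' else bs[j] := by
      have := List.getElem?_eq_getElem (l := pvMarkOne bs ((pvPosOf courses).getD s []))
        (i := j) (by omega)
      rw [this] at hone
      exact Option.some.inj hone
    rw [hone']
    have hmemiff : ((j : Int) ∈ (pvPosOf courses).getD s []) ↔ courses[j] = s := by
      rw [pvPosOf_mem]
      exact ⟨fun ⟨_, h⟩ => h, fun h => ⟨hj, h⟩⟩
    by_cases hss : courses[j] ∈ ss
    · simp [hss]
    · by_cases hcs : courses[j] = s
      · simp [hcs, hmemiff.mpr hcs]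
      · have : ¬ (j : Int) ∈ (pvPosOf courses).getD s [] := fun h => hcs (hmemiff.mp h)
        simp [hss, hcs, this]

theorem pvB_bits (ns courses : List Int) :
    pvMarkAll courses ns (List.replicate courses.length '0')
      = courses.map (fun c => if ns.contains c then '1' else '0') := by
  apply List.ext_getElem?
  intro j
  by_cases hj : j < courses.length
  · rw [pvMarkAll_getElem? courses ns _ (by simp) j hj]
    simp [hj]
  · have h1 : (pvMarkAll courses ns (List.replicate courses.length '0')).length ≤ j := by
      rw [pvMarkAll_length]; simp; omega
    rw [List.getElem?_eq_none h1, List.getElem?_eq_none (by simp; omega)]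

-- A's fused loop computes the mapped bitmap and its count of '1's.
theorem get_bit_map_foldl_general (ns : List Int) (cs : List Int) (acc : List Char) (k : Int) :
    cs.foldl
      (fun (st : String × Int) course_id =>
        if ns.contains course_id then (st.1 ++ "1", st.2 + 1)
        else (st.1 ++ "0", st.2))
      (String.ofList acc, k)
    = (String.ofList (acc ++ cs.map (fun c => if ns.contains c then '1' else '0')),
       k + ((cs.map (fun c => if ns.contains c then '1' else '0')).count '1' : Int)) := by
  induction cs generalizing acc k with
  | nil => simp
  | cons c cs ih =>
    by_cases h : ns.contains c = true
    · simp only [List.foldl_cons, h, if_true]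
      have : String.ofList acc ++ "1" = String.ofList (acc ++ ['1']) := by
        apply String.toList_injective; simp
      rw [this, ih]
      have hm : c ∈ ns := by simpa using h
      simp [hm]
      omega
    · simp only [List.foldl_cons, h, if_false, Bool.false_eq_true]
      have : String.ofList acc ++ "0" = String.ofList (acc ++ ['0']) := by
        apply String.toList_injective; simp
      rw [this, ih]
      have hm : c ∉ ns := by simpa using h
      simp [hm]

-- ===== VERDICT (by name: the statement is the Claim_ definition above) =====
theorem get_bit_map_spec : Claim_equal_get_bit_map := by
  intro ns cs _
  unfold Spec_get_bit_map get_bit_map get_bit_map_alt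
  have hB :
      ns.foldl
        (fun bs s =>
          (((PySem.List.enumerate cs).foldl
              (fun d p => d.modify p.2 [] (fun l => l ++ [p.1]))
              PySem.Dict.empty).getD s []).foldl
            (fun bs i => PySem.List.pySetD bs i '1') bs)
        (List.replicate cs.length '0')
      = cs.map (fun c => if ns.contains c then '1' else '0') := pvB_bits ns cs
  simp only [hB, PySem.List.count_eq]
  have h := get_bit_map_foldl_general ns cs [] 0
  simpa using h
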